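-- pv_equiv track=rewrite | github.com/GourmetSubZee/SteamedHamsScrambler | main.py | find_quiet_segments
-- ===== SOURCE A (Python) =====
-- def find_quiet_segments(segments, duration):
--     quiet_segments = []
--     for i in range(len(segments)):
--         if i == 0:
--             quiet_segments.append((0, segments[i]['start']))
--         if i == len(segments) - 1:
--             quiet_segments.append((segments[i]['end'], duration))
--         else:
--             quiet_segments.append((segments[i]['end'], segments[i + 1]['start']))
--     return quiet_segments
-- ===== SOURCE B (Python) =====
-- def find_quiet_segments(segments, duration):
--     if not segments:
--         return []
--     # Flatten the timeline into one boundary stream: 0, start0, end0, start1, end1, ..., duration.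
--     # Quiet segments are exactly the consecutive boundary pairs at even offsets.
--     timeline = [0]
--     for seg in segments:
--         timeline.append(seg['start'])
--         timeline.append(seg['end'])
--     timeline.append(duration)
--     return [(timeline[i], timeline[i + 1]) for i in range(0, len(timeline), 2)]
-- ===== Notes on version B (the rewrite author's own statement) =====
-- stated objective: alternative
-- what changed: Instead of A's index loop with first/last branches over the segments, B flattens everything into a single boundary timeline [0, start0, end0, ..., duration] and chunks it into consecutive pairs, since the quiet intervals are exactly the even-offset boundary pairs.
import Mathlib
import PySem

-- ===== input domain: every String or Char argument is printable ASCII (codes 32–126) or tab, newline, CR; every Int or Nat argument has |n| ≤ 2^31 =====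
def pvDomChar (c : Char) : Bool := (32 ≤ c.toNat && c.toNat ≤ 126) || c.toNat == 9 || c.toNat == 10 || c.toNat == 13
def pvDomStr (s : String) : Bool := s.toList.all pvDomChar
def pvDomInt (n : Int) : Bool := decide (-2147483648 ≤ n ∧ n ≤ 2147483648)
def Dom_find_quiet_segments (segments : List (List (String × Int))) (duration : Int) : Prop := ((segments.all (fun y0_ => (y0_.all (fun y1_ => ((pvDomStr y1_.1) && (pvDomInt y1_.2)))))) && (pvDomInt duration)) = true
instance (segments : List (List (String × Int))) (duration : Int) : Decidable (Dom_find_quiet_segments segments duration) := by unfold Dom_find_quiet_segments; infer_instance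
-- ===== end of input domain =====

-- B flattens the timeline into one boundary list and chunks it into pairs, instead of A's
-- index loop with first/last branches (alternative decomposition, same cost).
-- Pre_ excludes inputs where A raises KeyError (a segment missing the 'start' or 'end' key).

-- ===== PORT A =====
-- Python dict lookup on the assoc-list representation (first match); Pre_ guarantees the key exists
def segKey (s : List (String × Int)) (k : String) : Int :=
  (((s.find? (fun p => p.1 == k)).map (·.2)).getD 0)

-- A's loop body for i ≥ 1, as structural recursion over the same walk:
-- emit (end_i, start_{i+1}), or (end_last, duration) at the last index
def find_quiet_segments_go (segments : List (List (String × Int))) (duration : Int) : List (Int × Int) :=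
  match segments with
  | [] => []
  | [s] => [(segKey s "end", duration)]
  | s :: t :: rest => (segKey s "end", segKey t "start") :: find_quiet_segments_go (t :: rest) duration

def find_quiet_segments (segments : List (List (String × Int))) (duration : Int) : List (Int × Int) :=
  match segments with
  | [] => []
  | s :: _ => ((0 : Int), segKey s "start") :: find_quiet_segments_go segments duration

-- ===== PORT B =====
-- chunk the boundary stream into consecutive pairs (B's comprehension over even offsets)
def pairUp (xs : List Int) : List (Int × Int) :=
  match xs with
  | a :: b :: rest => (a, b) :: pairUp rest
  | _ => []

def find_quiet_segments_alt (segments : List (List (String × Int))) (duration : Int) : List (Int × Int) :=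
  if segments = [] then []
  else
    let timeline := (0 : Int) :: (segments.flatMap (fun s => [segKey s "start", segKey s "end"])) ++ [duration]
    pairUp timeline

-- ===== PRECONDITION & SPEC =====
-- Pre_: every segment dict contains both the 'start' and 'end' keys; A raises KeyError otherwise.
def Pre_find_quiet_segments (segments : List (List (String × Int))) (duration : Int) : Prop :=
  ∀ s ∈ segments, ((s.find? (fun p => p.1 == "start")).isSome ∧ (s.find? (fun p => p.1 == "end")).isSome)
instance (segments : List (List (String × Int))) (duration : Int) : Decidable (Pre_find_quiet_segments segments duration) := by unfold Pre_find_quiet_segments; infer_instance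

def pvWitness_find_quiet_segments : (List (List (String × Int))) × Int :=
  ([[("start", 1), ("end", 2)], [("start", 4), ("end", 5)]], 9)

def Spec_find_quiet_segments (segments : List (List (String × Int))) (duration : Int) (out : List (Int × Int)) : Prop := out = find_quiet_segments_alt segments duration
instance (segments : List (List (String × Int))) (duration : Int) (out : List (Int × Int)) : Decidable (Spec_find_quiet_segments segments duration out) := by unfold Spec_find_quiet_segments; infer_instance

-- ===== CLAIM (what is proved, stated in full; the proofs are below) =====
def Claim_equal_find_quiet_segments : Prop := ∀ (segments : List (List (String × Int))) (duration : Int), Dom_find_quiet_segments segments duration → Pre_find_quiet_segments segments duration → Spec_find_quiet_segments segments duration (find_quiet_segments segments duration)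

-- ===== LEMMAS AND PROOFS =====
-- A's tail walk equals B's pairing of the boundary stream starting at the current segment's end
lemma go_eq_pairUp (duration : Int) : ∀ (rest : List (List (String × Int))) (s : List (String × Int)),
    find_quiet_segments_go (s :: rest) duration =
      pairUp (segKey s "end" :: (rest.flatMap (fun x => [segKey x "start", segKey x "end"])) ++ [duration]) := by
  intro rest
  induction rest with
  | nil => intro s; simp [find_quiet_segments_go, pairUp]
  | cons t r ih => intro s; simp [find_quiet_segments_go, pairUp, ih t]

-- ===== VERDICT (by name: the statement is the Claim_ definition above) =====
theorem find_quiet_segments_spec : Claim_equal_find_quiet_segments := by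
  intro segments duration _ _
  unfold Spec_find_quiet_segments find_quiet_segments find_quiet_segments_alt
  cases segments with
  | nil => simp
  | cons s rest => simp [pairUp, go_eq_pairUp]
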